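-- pv_equiv track=rewrite | github.com/mittleff/libcerf | devtool/enumerate_diameters.py | sorted_polyominoes
-- ===== SOURCE A (Python) =====
-- def sorted_polyominoes(N):
--     Raw = []
--     for j in range(1,N):
--         for i in range(1,N):
--             d2 = j**2 + i**2
--             if d2 > N**2:
--                 continue
--             Raw.append((i, j, d2))
--     Tup = sorted(Raw, key=lambda t: t[2])
--     return Tup
-- ===== SOURCE B (Python) =====
-- def sorted_polyominoes(N):
--     # Bucket sort by d2 (bounded integer key): no comparison sort needed.
--     buckets = {}
--     for j in range(1, N):
--         for i in range(1, N):
--             d2 = j * j + i * i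
--             if d2 <= N * N:
--                 buckets.setdefault(d2, []).append((i, j, d2))
--     out = []
--     if N > 1:
--         for d2 in range(2, N * N + 1):
--             out.extend(buckets.get(d2, []))
--     return out
-- ===== Notes on version B (the rewrite author's own statement) =====
-- stated objective: alternative
-- what changed: B replaces A's generate-then-comparison-sort (sorted with key=d2) by a single-pass bucket sort: tuples are appended to a dict bucket keyed by d2 during generation and the buckets are concatenated in increasing d2 order, reproducing the stable sort order exactly.
import Mathlib
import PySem

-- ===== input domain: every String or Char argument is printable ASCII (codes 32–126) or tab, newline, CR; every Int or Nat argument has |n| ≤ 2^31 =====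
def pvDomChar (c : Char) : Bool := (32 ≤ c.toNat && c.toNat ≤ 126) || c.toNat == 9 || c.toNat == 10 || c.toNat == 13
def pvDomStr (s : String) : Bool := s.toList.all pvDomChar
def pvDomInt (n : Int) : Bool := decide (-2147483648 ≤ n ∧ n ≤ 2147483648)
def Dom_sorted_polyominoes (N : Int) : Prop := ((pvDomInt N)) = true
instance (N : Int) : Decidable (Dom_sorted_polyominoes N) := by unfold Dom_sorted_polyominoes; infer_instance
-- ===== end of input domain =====

-- B replaces A's comparison sort (sorted by d2 after generating all points) with a bucket
-- sort keyed by the bounded integer d2; same return value (objective: alternative algorithm).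

-- ===== PORT A =====
def sorted_polyominoes (N : Int) : List (List Int) :=
  let Raw : List (List Int) :=
    (PySem.List.pyRange 1 N 1).foldl (fun acc j =>
      (PySem.List.pyRange 1 N 1).foldl (fun acc i =>
        let d2 := j ^ 2 + i ^ 2
        if d2 > N ^ 2 then acc else acc ++ [[i, j, d2]]) acc) []
  -- key=lambda t: t[2]; pyGetD is exact here: every tuple in Raw has length 3
  PySem.List.sorted Raw (fun t => PySem.List.pyGetD t 2 0)

-- ===== PORT B =====
def sorted_polyominoes_alt (N : Int) : List (List Int) :=
  -- buckets.setdefault(d2, []).append(t)  ≙  Dict.modify d2 [] (· ++ [t])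
  let buckets : PySem.Dict Int (List (List Int)) :=
    (PySem.List.pyRange 1 N 1).foldl (fun d j =>
      (PySem.List.pyRange 1 N 1).foldl (fun d i =>
        let d2 := j * j + i * i
        if d2 ≤ N * N then d.modify d2 [] (· ++ [[i, j, d2]]) else d) d) PySem.Dict.empty
  if 1 < N then
    (PySem.List.pyRange 2 (N * N + 1) 1).foldl (fun out k => out ++ buckets.getD k []) []
  else []

-- ===== PRECONDITION & SPEC =====
def Spec_sorted_polyominoes (N : Int) (out : List (List Int)) : Prop := out = sorted_polyominoes_alt N
instance (N : Int) (out : List (List Int)) : Decidable (Spec_sorted_polyominoes N out) := by unfold Spec_sorted_polyominoes; infer_instance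

-- ===== CLAIM (what is proved, stated in full; the proofs are below) =====
def Claim_equal_sorted_polyominoes : Prop := ∀ (N : Int), Dom_sorted_polyominoes N → Spec_sorted_polyominoes N (sorted_polyominoes N)

-- ===== LEMMAS AND PROOFS =====

-- the (d2, tuple) pairs in generation order, shared normal form of both ports
def pvPairs (N : Int) : List (Int × List Int) :=
  (PySem.List.pyRange 1 N 1).flatMap (fun j =>
    ((PySem.List.pyRange 1 N 1).filter (fun i => decide (j * j + i * i ≤ N * N))).map
      (fun i => (j * j + i * i, [i, j, j * j + i * i])))

theorem foldl_append_ifnot {α β : Type} (p : α → Prop) [DecidablePred p] (f : α → β)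
    (l : List α) (acc : List β) :
    l.foldl (fun acc x => if p x then acc else acc ++ [f x]) acc
      = acc ++ (l.filter (fun x => !decide (p x))).map f := by
  induction l generalizing acc with
  | nil => simp
  | cons x t ih =>
    simp only [List.foldl_cons, List.filter_cons]
    by_cases h : p x <;> simp [h, ih]

theorem foldl_ifP_eq_foldl_filter {α δ : Type} (p : α → Prop) [DecidablePred p]
    (f : δ → α → δ) (l : List α) (init : δ) :
    l.foldl (fun acc x => if p x then f acc x else acc) init
      = (l.filter (fun x => decide (p x))).foldl f init := by
  induction l generalizing init with
  | nil => rfl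
  | cons x t ih =>
    simp only [List.foldl_cons, List.filter_cons]
    by_cases h : p x <;> simp [h, ih]

-- ----- A in normal form: a stable sort of the generated tuples -----
theorem pvA_eq (N : Int) :
    sorted_polyominoes N
      = PySem.List.sorted ((pvPairs N).map (·.2)) (fun t => PySem.List.pyGetD t 2 0) := by
  have hinner : (fun (acc : List (List Int)) (j : Int) =>
        (PySem.List.pyRange 1 N 1).foldl (fun acc i =>
          if j ^ 2 + i ^ 2 > N ^ 2 then acc else acc ++ [[i, j, j ^ 2 + i ^ 2]]) acc)
      = (fun acc j => acc ++
          (((PySem.List.pyRange 1 N 1).filter (fun i => !decide (j ^ 2 + i ^ 2 > N ^ 2))).map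
            (fun i => [i, j, j ^ 2 + i ^ 2]))) := by
    funext acc j
    exact foldl_append_ifnot _ _ _ _
  simp only [sorted_polyominoes, hinner, PySem.List.foldl_append_eq_flatMap, List.nil_append]
  simp only [pvPairs, List.map_flatMap, List.map_map]
  congr 1
  apply List.flatMap_congr
  intro j _
  have hpred : (fun i => !decide (j ^ 2 + i ^ 2 > N ^ 2))
      = (fun i : Int => decide (j * j + i * i ≤ N * N)) := by
    funext i
    rw [← decide_not]
    simp [pow_two, not_lt]
  rw [hpred]
  apply List.map_congr_left
  intro a _
  have h2 : j ^ 2 + a ^ 2 = j * j + a * a := by ring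
  rw [h2]
  rfl

-- ----- B in normal form: concatenation of the d2-buckets of pvPairs -----
theorem pvB_eq (N : Int) (hN : 1 < N) :
    sorted_polyominoes_alt N
      = (PySem.List.pyRange 2 (N * N + 1) 1).flatMap
          (fun k => ((pvPairs N).filter (fun p => p.1 == k)).map (·.2)) := by
  have hbuckets : ((PySem.List.pyRange 1 N 1).foldl (fun d j =>
        (PySem.List.pyRange 1 N 1).foldl (fun d i =>
          if j * j + i * i ≤ N * N then d.modify (j * j + i * i) [] (· ++ [[i, j, j * j + i * i]]) else d) d)
        (PySem.Dict.empty : PySem.Dict Int (List (List Int))))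
      = (pvPairs N).foldl (fun d p => d.modify p.1 [] (· ++ [p.2])) PySem.Dict.empty := by
    rw [pvPairs, List.foldl_flatMap]
    congr 1
    funext d j
    rw [foldl_ifP_eq_foldl_filter, List.foldl_map]
  simp only [sorted_polyominoes_alt, hbuckets, if_pos hN]
  have hget : (fun (out : List (List Int)) (k : Int) => out ++
        ((pvPairs N).foldl (fun d p => d.modify p.1 [] (· ++ [p.2])) PySem.Dict.empty).getD k [])
      = (fun out k => out ++ ((pvPairs N).filter (fun p => p.1 == k)).map (·.2)) := by
    funext out k
    rw [PySem.Dict.getD_foldl_modify_append, PySem.Dict.getD_empty, List.nil_append]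
  rw [hget, PySem.List.foldl_append_eq_flatMap, List.nil_append]

-- ----- stable insertion sort = bucket concatenation, for keys ranged over a strictly increasing list -----
theorem insertBy_cons {α : Type} (before : α → α → Bool) (x y : α) (l : List α) :
    PySem.List.insertBy before x (y :: l) =
      if before x y then x :: y :: l else y :: PySem.List.insertBy before x l := rfl

theorem insertBy_append_left {α : Type} (before : α → α → Bool) (x : α) (l1 l2 : List α)
    (h : ∀ y ∈ l1, before x y = false) :
    PySem.List.insertBy before x (l1 ++ l2) = l1 ++ PySem.List.insertBy before x l2 := by
  induction l1 with
  | nil => rfl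
  | cons y t ih =>
    have hy : before x y = false := h y (by simp)
    simp only [List.cons_append, insertBy_cons, hy, Bool.false_eq_true, if_false]
    rw [ih (fun z hz => h z (by simp [hz]))]

theorem insertBy_of_forall_before {α : Type} (before : α → α → Bool) (x : α) (l : List α)
    (h : ∀ y ∈ l, before x y = true) :
    PySem.List.insertBy before x l = x :: l := by
  cases l with
  | nil => rfl
  | cons y t => simp [insertBy_cons, h y (by simp)]

theorem insertBy_bucket {α : Type} (key : α → Int) (x : α) (ks : List Int) (xs : List α)
    (hks : ks.Pairwise (· < ·)) (hk : key x ∈ ks) :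
    PySem.List.insertBy (fun a b => decide (key a < key b)) x
        (ks.flatMap (fun k => xs.filter (fun y => key y == k)))
      = ks.flatMap (fun k => (xs ++ [x]).filter (fun y => key y == k)) := by
  induction ks with
  | nil => simp at hk
  | cons k0 ks ih =>
    obtain ⟨hlt0, htail⟩ := List.pairwise_cons.mp hks
    simp only [List.flatMap_cons]
    by_cases h0 : key x = k0
    · have hF0 : ∀ y ∈ xs.filter (fun y => key y == k0), decide (key x < key y) = false := by
        intro y hy
        have h2 := (List.mem_filter.mp hy).2
        simp only [beq_iff_eq] at h2
        simp [h2, h0]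
      rw [insertBy_append_left _ _ _ _ hF0]
      have hrest : ∀ y ∈ ks.flatMap (fun k => xs.filter (fun y => key y == k)),
          decide (key x < key y) = true := by
        intro y hy
        obtain ⟨k, hkks, hyf⟩ := List.mem_flatMap.mp hy
        have h2 := (List.mem_filter.mp hyf).2
        simp only [beq_iff_eq] at h2
        have hk0k := hlt0 k hkks
        simp [h2, h0]
        omega
      rw [insertBy_of_forall_before _ _ _ hrest]
      rw [List.filter_append]
      have hx0 : [x].filter (fun y => key y == k0) = [x] := by simp [h0]
      have htl : ks.flatMap (fun k => (xs ++ [x]).filter (fun y => key y == k))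
          = ks.flatMap (fun k => xs.filter (fun y => key y == k)) := by
        apply List.flatMap_congr
        intro k hkks
        rw [List.filter_append]
        have : (key x == k) = false := by
          have := hlt0 k hkks
          simp [h0]
          omega
        simp [this]
      rw [hx0, htl]
      simp
    · have hk' : key x ∈ ks := by
        rcases List.mem_cons.mp hk with h | h
        · exact absurd h h0
        · exact h
      have hlt : k0 < key x := hlt0 _ hk'
      have hF0 : ∀ y ∈ xs.filter (fun y => key y == k0), decide (key x < key y) = false := by
        intro y hy
        have h2 := (List.mem_filter.mp hy).2
        simp only [beq_iff_eq] at h2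
        simp [h2]
        omega
      rw [insertBy_append_left _ _ _ _ hF0, ih htail hk']
      rw [List.filter_append]
      have : [x].filter (fun y => key y == k0) = [] := by simp [h0]
      rw [this]
      simp
theorem stable_bucket {α : Type} (key : α → Int) (ks : List Int) (xs : List α)
    (hks : ks.Pairwise (· < ·)) (hx : ∀ x ∈ xs, key x ∈ ks) :
    PySem.List.sorted xs key
      = ks.flatMap (fun k => xs.filter (fun y => key y == k)) := by
  induction xs using List.reverseRecOn with
  | nil => simp [PySem.List.sorted_eq_foldl_insertBy]
  | append_singleton xs x ih =>
    rw [PySem.List.sorted_eq_foldl_insertBy, List.foldl_append, List.foldl_cons, List.foldl_nil,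
      ← PySem.List.sorted_eq_foldl_insertBy,
      ih (fun y hy => hx y (by simp [hy]))]
    exact insertBy_bucket key x ks xs hks (hx x (by simp))

theorem mem_pvPairs_shape (N : Int) (p : Int × List Int) (hp : p ∈ pvPairs N) :
    PySem.List.pyGetD p.2 2 0 = p.1 ∧ 2 ≤ p.1 ∧ p.1 ≤ N * N := by
  simp only [pvPairs, List.mem_flatMap, List.mem_map, List.mem_filter,
    PySem.List.mem_pyRange_one, decide_eq_true_eq] at hp
  obtain ⟨j, hj, i, ⟨hi, hile⟩, rfl⟩ := hp
  refine ⟨rfl, ?_, hile⟩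
  nlinarith [hj.1, hi.1]

theorem sorted_polyominoes_eq_alt (N : Int) : sorted_polyominoes N = sorted_polyominoes_alt N := by
  by_cases hN : 1 < N
  swap
  · have hnil : PySem.List.pyRange 1 N 1 = [] := PySem.List.pyRange_one_eq_nil (by omega)
    simp [sorted_polyominoes, sorted_polyominoes_alt, hnil, hN,
      PySem.List.sorted_eq_foldl_insertBy]
  rw [pvA_eq, pvB_eq N hN]
  rw [stable_bucket (fun t => PySem.List.pyGetD t 2 0) (PySem.List.pyRange 2 (N * N + 1) 1)
    ((pvPairs N).map (·.2)) (PySem.List.pairwise_lt_pyRange_one 2 (N * N + 1)) ?keys]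
  case keys =>
    intro y hy
    obtain ⟨p, hp, rfl⟩ := List.mem_map.mp hy
    obtain ⟨hkey, h2, hle⟩ := mem_pvPairs_shape N p hp
    simp only [hkey, PySem.List.mem_pyRange_one]
    omega
  apply List.flatMap_congr
  intro k hk
  rw [List.filter_map]
  congr 1
  apply List.filter_congr
  intro p hp
  simp only [Function.comp]
  rw [(mem_pvPairs_shape N p hp).1]

-- ===== VERDICT (by name: the statement is the Claim_ definition above) =====
theorem sorted_polyominoes_spec : Claim_equal_sorted_polyominoes := by
  intro N _
  exact sorted_polyominoes_eq_alt N
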